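-- pv_equiv track=rewrite | github.com/alebegge/techtalks | big_o.py | bob_solution
-- ===== SOURCE A (Python) =====
-- def bob_solution(n):
--     solutions = 0
--     for a in range(n+1):
--         for b in range(n+1):
--             for c in range(n+1):
--                 if a+b+c == n:
--                     solutions += 1
--     return solutions
-- ===== SOURCE B (Python) =====
-- def bob_solution(n):
--     # number of (a,b,c) with 0<=a,b,c<=n and a+b+c=n is C(n+2,2)
--     return (n + 1) * (n + 2) // 2 if n >= 0 else 0
-- ===== Notes on version B (the rewrite author's own statement) =====
-- stated objective: faster
-- what changed: Replaced the cubic triple loop that counts solutions of a+b+c=n with the closed-form binomial formula (n+1)(n+2)//2 (0 for negative n).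
import Mathlib
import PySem

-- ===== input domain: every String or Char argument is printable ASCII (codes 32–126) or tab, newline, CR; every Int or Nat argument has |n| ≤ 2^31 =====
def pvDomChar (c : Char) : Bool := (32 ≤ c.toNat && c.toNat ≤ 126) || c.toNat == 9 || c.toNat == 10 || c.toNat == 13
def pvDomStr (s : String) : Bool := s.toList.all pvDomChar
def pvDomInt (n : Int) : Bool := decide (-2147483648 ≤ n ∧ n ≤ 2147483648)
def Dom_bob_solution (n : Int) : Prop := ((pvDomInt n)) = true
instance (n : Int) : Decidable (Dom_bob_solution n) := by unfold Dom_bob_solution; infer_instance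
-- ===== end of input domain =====

-- B replaces A's O(n^3) triple loop with the closed-form count (n+1)(n+2)//2 (0 for n < 0): objective = faster (asymptotic).

-- ===== PORT A =====
def bob_solution (n : Int) : Int :=
  (PySem.List.pyRange 0 (n+1) 1).foldl (fun solutions a =>
    (PySem.List.pyRange 0 (n+1) 1).foldl (fun solutions b =>
      (PySem.List.pyRange 0 (n+1) 1).foldl (fun solutions c =>
        if a + b + c = n then solutions + 1 else solutions) solutions) solutions) 0

-- ===== PORT B =====
def bob_solution_alt (n : Int) : Int :=
  if 0 ≤ n then PySem.Int.floordiv ((n + 1) * (n + 2)) 2 else 0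

-- ===== PRECONDITION & SPEC =====
def Spec_bob_solution (n : Int) (out : Int) : Prop := out = bob_solution_alt n
instance (n : Int) (out : Int) : Decidable (Spec_bob_solution n out) := by unfold Spec_bob_solution; infer_instance

-- ===== CLAIM (what is proved, stated in full; the proofs are below) =====
def Claim_equal_bob_solution : Prop := ∀ (n : Int), Dom_bob_solution n → Spec_bob_solution n (bob_solution n)

-- ===== LEMMAS AND PROOFS =====

/-- A counting loop `for x in l: if p x: acc += 1` adds `countP p` to the accumulator. -/
theorem pv_foldl_ite_count (p : Int → Prop) [DecidablePred p] (l : List Int) (s : Int) :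
    l.foldl (fun acc x => if p x then acc + 1 else acc) s
      = s + ((l.countP (fun x => decide (p x)) : Nat) : Int) := by
  induction l generalizing s with
  | nil => simp
  | cons x xs ih =>
    simp only [List.foldl_cons, List.countP_cons]
    by_cases h : p x
    · rw [if_pos h, ih, if_pos (decide_eq_true h)]
      push_cast; ring
    · rw [if_neg h, ih, if_neg (by simpa using h)]
      push_cast; ring

/-- countP of an equality-shaped predicate on a range is a 0/1 membership test. -/
theorem pv_countP_eq_mem (t lo hi : Int) :
    ((PySem.List.pyRange lo hi 1).countP (fun x => decide (x = t)) : Nat)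
      = (if lo ≤ t ∧ t < hi then 1 else 0) := by
  have hnd := PySem.List.nodup_pyRange_one lo hi
  have hcount : (PySem.List.pyRange lo hi 1).countP (fun x => decide (x = t))
      = (PySem.List.pyRange lo hi 1).count t := by
    apply List.countP_congr
    intro x _
    simp
  rw [hcount]
  by_cases h : lo ≤ t ∧ t < hi
  · have hm : t ∈ PySem.List.pyRange lo hi 1 := (PySem.List.mem_pyRange_one).mpr h
    rw [List.count_eq_one_of_mem hnd hm, if_pos h]
  · have hm : t ∉ PySem.List.pyRange lo hi 1 :=
      fun hc => h ((PySem.List.mem_pyRange_one).mp hc)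
    rw [List.count_eq_zero_of_not_mem hm, if_neg h]

/-- The middle loop's count: how many b in [0, n] have a + b ≤ n, given 0 ≤ a ≤ n. -/
theorem pv_count_middle (n a : Int) (ha0 : 0 ≤ a) (han : a ≤ n) :
    (((PySem.List.pyRange 0 (n+1) 1).countP
        (fun b => decide (0 ≤ n - a - b ∧ n - a - b < n + 1)) : Nat) : Int)
      = n - a + 1 := by
  rw [PySem.List.pyRange_one_append 0 (n - a + 1) (n + 1) (by omega) (by omega)]
  rw [List.countP_append]
  have h1 : (PySem.List.pyRange 0 (n-a+1) 1).countP
      (fun b => decide (0 ≤ n - a - b ∧ n - a - b < n + 1))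
      = (PySem.List.pyRange 0 (n-a+1) 1).length := by
    apply List.countP_eq_length.mpr
    intro b hb
    rw [PySem.List.mem_pyRange_one] at hb
    simp only [decide_eq_true_eq]
    omega
  have h2 : (PySem.List.pyRange (n-a+1) (n+1) 1).countP
      (fun b => decide (0 ≤ n - a - b ∧ n - a - b < n + 1)) = 0 := by
    apply List.countP_eq_zero.mpr
    intro b hb
    rw [PySem.List.mem_pyRange_one] at hb
    simp only [decide_eq_true_eq]
    omega
  rw [h1, h2, PySem.List.length_pyRange_one]
  push_cast
  omega

/-- Twice the arithmetic sum Σ_{k<m} (c - k). -/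
theorem pv_sum_range (m : Nat) (c : Int) :
    2 * (((List.range m).map (fun k : Nat => c - (k : Int))).sum) = m * (2 * c - m + 1) := by
  induction m with
  | zero => simp
  | succ m ih =>
    rw [List.range_succ, List.map_append, List.sum_append]
    push_cast
    push_cast at ih
    simp only [List.map_cons, List.map_nil, List.sum_cons, List.sum_nil]
    linear_combination ih

theorem pv_inner (n a b : Int) (s : Int) :
    (PySem.List.pyRange 0 (n+1) 1).foldl
        (fun solutions c => if a + b + c = n then solutions + 1 else solutions) s
      = s + (if 0 ≤ n - a - b ∧ n - a - b < n + 1 then 1 else 0) := by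
  rw [pv_foldl_ite_count (fun c => a + b + c = n)]
  have : (PySem.List.pyRange 0 (n+1) 1).countP (fun x => decide (a + b + x = n))
      = (PySem.List.pyRange 0 (n+1) 1).countP (fun x => decide (x = n - a - b)) := by
    apply List.countP_congr
    intro x _
    simp only [decide_eq_true_eq]
    constructor <;> intro h <;> omega
  rw [this, pv_countP_eq_mem]
  split_ifs <;> simp

theorem pv_middle (n a : Int) (ha0 : 0 ≤ a) (han : a ≤ n) (s : Int) :
    (PySem.List.pyRange 0 (n+1) 1).foldl
        (fun solutions b =>
          (PySem.List.pyRange 0 (n+1) 1).foldl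
            (fun solutions c => if a + b + c = n then solutions + 1 else solutions)
            solutions) s
      = s + (n - a + 1) := by
  have hc : (PySem.List.pyRange 0 (n+1) 1).foldl
      (fun solutions b =>
        (PySem.List.pyRange 0 (n+1) 1).foldl
          (fun solutions c => if a + b + c = n then solutions + 1 else solutions)
          solutions) s
      = (PySem.List.pyRange 0 (n+1) 1).foldl
        (fun solutions b =>
          if (0 ≤ n - a - b ∧ n - a - b < n + 1) then solutions + 1 else solutions) s := by
    apply PySem.List.foldl_congr_mem
    intro acc b _
    rw [pv_inner]
    split_ifs <;> ring
  rw [hc, pv_foldl_ite_count (fun b => 0 ≤ n - a - b ∧ n - a - b < n + 1),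
    pv_count_middle n a ha0 han]

-- ===== VERDICT (by name: the statement is the Claim_ definition above) =====
theorem bob_solution_spec : Claim_equal_bob_solution := by
  intro n _
  unfold Spec_bob_solution bob_solution bob_solution_alt
  by_cases hn : 0 ≤ n
  · simp only [hn, if_true]
    have houter : (PySem.List.pyRange 0 (n+1) 1).foldl
        (fun solutions a =>
          (PySem.List.pyRange 0 (n+1) 1).foldl
            (fun solutions b =>
              (PySem.List.pyRange 0 (n+1) 1).foldl
                (fun solutions c => if a + b + c = n then solutions + 1 else solutions)
                solutions) solutions) 0
        = (PySem.List.pyRange 0 (n+1) 1).foldl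
            (fun solutions a => solutions + ((n + 1) - a)) 0 := by
      apply PySem.List.foldl_congr_mem
      intro acc a ha
      rw [PySem.List.mem_pyRange_one] at ha
      rw [pv_middle n a ha.1 (by omega)]
      ring
    rw [houter, PySem.List.foldl_add]
    have hsum : 2 * (((PySem.List.pyRange 0 (n+1) 1).map (fun a => (n + 1) - a)).sum)
        = (n + 1) * (n + 2) := by
      rw [PySem.List.pyRange_one]
      rw [List.map_map]
      have hcomp : ((fun a => (n + 1) - a) ∘ fun k : Nat => (0 : Int) + k)
          = fun k : Nat => (n + 1) - (k : Int) := by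
        funext k; simp
      rw [hcomp, pv_sum_range ((n+1-0).toNat) (n+1)]
      have hm : (((n+1-0).toNat : Nat) : Int) = n + 1 := by omega
      rw [hm]; ring
    have h2 : (n + 1) * (n + 2) = 2 * (((PySem.List.pyRange 0 (n+1) 1).map (fun a => (n + 1) - a)).sum) := hsum.symm
    have : PySem.Int.floordiv ((n + 1) * (n + 2)) 2
        = ((PySem.List.pyRange 0 (n+1) 1).map (fun a => (n + 1) - a)).sum := by
      rw [h2, PySem.Int.floordiv_eq_ediv_of_pos (by norm_num)]
      omega
    rw [this]
    exact zero_add _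
  · have hnil : PySem.List.pyRange 0 (n+1) 1 = [] :=
      PySem.List.pyRange_one_eq_nil (by omega)
    simp [hnil, hn]
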